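-- pv_equiv track=rewrite | github.com/LongWeeeeeee/bets | base/test_filters.py | is_early_match_stable3k_5min
-- ===== SOURCE A (Python) =====
-- from typing import Tuple, Optional, Dict, Any
--
-- def is_early_match_stable3k_5min(match: Dict) -> Tuple[bool, Optional[str]]:
--     """Stable lead >= 3k минимум 5 минут подряд на 15-30."""
--     leads = match.get('radiantNetworthLeads', [])
--     duration = len(leads)
--
--     if duration < 30 or duration > 50:
--         return False, None
--
--     consecutive_r = 0
--     consecutive_d = 0
--
--     for i in range(15, min(30, duration)):
--         if leads[i] >= 3000:
--             consecutive_r += 1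
--             consecutive_d = 0
--             if consecutive_r >= 5:
--                 return True, 'radiant'
--         elif leads[i] <= -3000:
--             consecutive_d += 1
--             consecutive_r = 0
--             if consecutive_d >= 5:
--                 return True, 'dire'
--         else:
--             consecutive_r = 0
--             consecutive_d = 0
--
--     return False, None
-- ===== SOURCE B (Python) =====
-- def is_early_match_stable3k_5min(match):
--     """Stable lead >= 3k for at least 5 consecutive minutes in window 15..30."""
--     leads = match.get('radiantNetworthLeads', [])
--     if not (30 <= len(leads) <= 50):
--         return False, None
--     for end in range(19, 30):
--         window = leads[end - 4:end + 1]
--         if all(v >= 3000 for v in window):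
--             return True, 'radiant'
--         if all(v <= -3000 for v in window):
--             return True, 'dire'
--     return False, None
-- ===== Notes on version B (the rewrite author's own statement) =====
-- stated objective: alternative
-- what changed: A's single stateful pass with two running consecutive-counters is replaced by a stateless brute-force sliding-window check: for each candidate end minute 19..29 it re-examines the whole 5-element slice leads[end-4:end+1] with all(), returning at the earliest uniform window; no counters or resets are maintained.
import Mathlib
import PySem

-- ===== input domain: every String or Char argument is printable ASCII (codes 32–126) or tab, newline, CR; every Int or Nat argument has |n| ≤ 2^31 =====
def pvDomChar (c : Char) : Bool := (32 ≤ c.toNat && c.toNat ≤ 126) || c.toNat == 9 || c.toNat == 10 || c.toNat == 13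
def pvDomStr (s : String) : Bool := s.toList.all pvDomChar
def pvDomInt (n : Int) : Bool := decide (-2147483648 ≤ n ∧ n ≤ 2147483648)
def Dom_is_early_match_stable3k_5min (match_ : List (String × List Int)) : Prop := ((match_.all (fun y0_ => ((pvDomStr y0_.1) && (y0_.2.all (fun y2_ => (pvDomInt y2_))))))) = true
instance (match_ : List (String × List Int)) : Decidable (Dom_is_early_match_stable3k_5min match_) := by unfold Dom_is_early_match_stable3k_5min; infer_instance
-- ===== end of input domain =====

-- B replaces A's stateful two-counter pass by a stateless brute-force sliding-window scan
-- (re-check each 5-element slice with all()); alternative algorithm, same O(1) cost.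

-- ===== PORT A =====
-- A's for-loop over range(15, min(30, duration)) with early return, as structural
-- recursion over the index list; leads[i] is ported with pyGetD (the caller's guard
-- ensures 15 ≤ i < 30 ≤ duration, so the index is always in range and pyGetD is exact).
def pvLoopA (leads : List Int) : List Int → Nat → Nat → Bool × Option String
  | [], _, _ => (false, none)
  | i :: rest, cr, cd =>
    let v := PySem.List.pyGetD leads i 0
    if v ≥ 3000 then
      if cr + 1 ≥ 5 then (true, some "radiant") else pvLoopA leads rest (cr + 1) 0
    else if v ≤ -3000 then
      if cd + 1 ≥ 5 then (true, some "dire") else pvLoopA leads rest 0 (cd + 1)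
    else pvLoopA leads rest 0 0

def is_early_match_stable3k_5min (match_ : List (String × List Int)) : Bool × Option String :=
  let leads := PySem.Dict.getD (PySem.Dict.mk match_) "radiantNetworthLeads" []
  let duration : Int := leads.length
  if duration < 30 ∨ duration > 50 then (false, none)
  else pvLoopA leads (PySem.List.pyRange 15 (min 30 duration) 1) 0 0

-- ===== PORT B =====
-- B's for-loop over range(19, 30): at each candidate end, slice leads[end-4:end+1]
-- and test both all() conditions afresh; no state carried between iterations.
def pvLoopB (leads : List Int) : List Int → Bool × Option String
  | [] => (false, none)
  | e :: rest =>
    let w := PySem.List.slice leads (some (e - 4)) (some (e + 1))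
    if w.all (fun v => decide (v ≥ 3000)) then (true, some "radiant")
    else if w.all (fun v => decide (v ≤ -3000)) then (true, some "dire")
    else pvLoopB leads rest

def is_early_match_stable3k_5min_alt (match_ : List (String × List Int)) : Bool × Option String :=
  let leads := PySem.Dict.getD (PySem.Dict.mk match_) "radiantNetworthLeads" []
  if ¬ (30 ≤ leads.length ∧ leads.length ≤ 50) then (false, none)
  else pvLoopB leads (PySem.List.pyRange 19 30 1)

-- ===== PRECONDITION & SPEC =====
def Spec_is_early_match_stable3k_5min (match_ : List (String × List Int)) (out : Bool × Option String) : Prop := out = is_early_match_stable3k_5min_alt match_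
instance (match_ : List (String × List Int)) (out : Bool × Option String) : Decidable (Spec_is_early_match_stable3k_5min match_ out) := by unfold Spec_is_early_match_stable3k_5min; infer_instance

-- ===== CLAIM =====
def Claim_equal_is_early_match_stable3k_5min : Prop := ∀ (match_ : List (String × List Int)), Dom_is_early_match_stable3k_5min match_ → Spec_is_early_match_stable3k_5min match_ (is_early_match_stable3k_5min match_)

-- ===== LEMMAS AND PROOFS =====

-- A's loop on values only (the indices are only used to fetch the values)
def pvLoopVals : List Int → Nat → Nat → Bool × Option String
  | [], _, _ => (false, none)
  | v :: rest, cr, cd =>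
    if v ≥ 3000 then
      if cr + 1 ≥ 5 then (true, some "radiant") else pvLoopVals rest (cr + 1) 0
    else if v ≤ -3000 then
      if cd + 1 ≥ 5 then (true, some "dire") else pvLoopVals rest 0 (cd + 1)
    else pvLoopVals rest 0 0

lemma pvLoopA_eq_vals (leads : List Int) (idxs : List Int) (cr cd : Nat) :
    pvLoopA leads idxs cr cd
      = pvLoopVals (idxs.map (fun i => PySem.List.pyGetD leads i 0)) cr cd := by
  induction idxs generalizing cr cd with
  | nil => rfl
  | cons i rest ih =>
    simp only [pvLoopA, pvLoopVals, List.map]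
    split_ifs <;> simp [ih]

-- the fetched window equals the slice
lemma pv_map_get_range (leads : List Int) (a n : Nat) (h : a + n ≤ leads.length) :
    (PySem.List.pyRange a (a + n) 1).map (fun i => PySem.List.pyGetD leads i 0)
      = (leads.drop a).take n := by
  induction n generalizing a with
  | zero =>
    rw [PySem.List.pyRange_one_eq_nil (by omega)]
    simp
  | succ n ih =>
    rw [PySem.List.pyRange_one_cons (by omega : (a : Int) < (a : Int) + (n + 1 : Nat))]
    have h1 : a < leads.length := by omega
    have : ((a : Int) + 1) = ((a + 1 : Nat) : Int) := by push_cast; ring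
    have h2 : ((a : Int) + ((n + 1 : Nat) : Int)) = ((a + 1 : Nat) : Int) + (n : Int) := by
      push_cast; ring
    rw [List.map_cons, this, h2, ih (a + 1) (by omega)]
    have hd : (leads.drop a).take (n + 1)
        = leads[a] :: (leads.drop (a + 1)).take n := by
      rw [List.drop_eq_getElem_cons h1, List.take_succ_cons]
    rw [hd]
    congr 1
    simp [PySem.List.pyGetD_natCast, List.getD, h1]

-- B's loop, reformulated on values: scan the values carrying the last ≤4 seen (hist),
-- checking each full 5-window hist ++ [v]
def pvWin : List Int → List Int → Bool × Option String
  | _, [] => (false, none)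
  | hist, v :: rest =>
    let w := hist ++ [v]
    if w.length = 5 ∧ w.all (fun x => decide (x ≥ 3000)) = true then (true, some "radiant")
    else if w.length = 5 ∧ w.all (fun x => decide (x ≤ -3000)) = true then (true, some "dire")
    else pvWin (if w.length = 5 then w.drop 1 else w) rest

-- trailing count: length of the longest all-p suffix
def pvTC (p : Int → Bool) : List Int → Nat
  | [] => 0
  | v :: rest => if (v :: rest).all p then rest.length + 1 else pvTC p rest

lemma pvTC_le (p : Int → Bool) (l : List Int) : pvTC p l ≤ l.length := by
  induction l with
  | nil => simp [pvTC]
  | cons v rest ih =>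
    simp only [pvTC]
    split_ifs <;> simp <;> omega

lemma pvTC_eq_len_iff (p : Int → Bool) (l : List Int) :
    pvTC p l = l.length ↔ l.all p = true := by
  cases l with
  | nil => simp [pvTC]
  | cons v rest =>
    simp only [pvTC]
    split_ifs with h
    · simp [h]
    · simp only [h]
      constructor
      · intro he
        have := pvTC_le p rest
        simp at he; omega
      · intro hc; exact absurd hc (by simpa using h)

lemma pvTC_append (p : Int → Bool) (l : List Int) (v : Int) :
    pvTC p (l ++ [v]) = if p v then pvTC p l + 1 else 0 := by
  induction l with
  | nil => simp [pvTC]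
  | cons x t ih =>
    by_cases hv : p v
    · rw [if_pos hv]
      by_cases ha : (x :: t).all p
      · have hall : ((x :: (t ++ [v])).all p) = true := by simp_all
        simp only [List.cons_append, pvTC]
        rw [if_pos hall, if_pos ha]
        simp
      · have : ¬ ((x :: t) ++ [v]).all p = true := by simp_all
        simp only [List.cons_append, pvTC] at *
        rw [if_neg this, if_neg ha, ih, if_pos hv]
    · rw [if_neg hv]
      have : ¬ ((x :: t) ++ [v]).all p = true := by simp [hv]
      simp only [List.cons_append, pvTC] at *
      rw [if_neg this, ih, if_neg hv]

lemma pvTC_drop1 (p : Int → Bool) (l : List Int) (h : pvTC p l ≠ l.length) :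
    pvTC p (l.drop 1) = pvTC p l := by
  cases l with
  | nil => rfl
  | cons v rest =>
    by_cases ha : (v :: rest).all p = true
    · exact absurd (by simp [pvTC, ha]) h
    · simp [pvTC, ha]

-- the core correspondence: A's counters equal the trailing counts of B's history
lemma pv_core (vs : List Int) (hist : List Int) (cr cd : Nat)
    (hlen : hist.length ≤ 4)
    (hr : cr = pvTC (fun x => decide (x ≥ 3000)) hist)
    (hd : cd = pvTC (fun x => decide (x ≤ -3000)) hist) :
    pvLoopVals vs cr cd = pvWin hist vs := by
  induction vs generalizing hist cr cd with
  | nil => cases hist <;> rfl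
  | cons v rest ih =>
    set R : Int → Bool := fun x => decide (x ≥ 3000) with hR
    set D : Int → Bool := fun x => decide (x ≤ -3000) with hD
    have hcr_le : cr ≤ 4 := hr ▸ le_trans (pvTC_le _ _) hlen
    have hcd_le : cd ≤ 4 := hd ▸ le_trans (pvTC_le _ _) hlen
    simp only [pvLoopVals, pvWin]
    set w : List Int := hist ++ [v] with hw
    have hwlen : w.length = hist.length + 1 := by simp [hw]
    by_cases hvr : v ≥ 3000
    · have hRv : R v = true := by simp [hR, hvr]
      have hDv : D v = false := by simp [hD]; omega
      have hallR : w.all R = true ↔ hist.all R = true := by simp [hw, hRv]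
      have hTCRw : pvTC R w = cr + 1 := by rw [hw, pvTC_append, hRv, if_pos rfl, hr]
      have hTCDw : pvTC D w = 0 := by rw [hw, pvTC_append, hDv]; simp
      rw [if_pos hvr]
      by_cases h5 : cr + 1 ≥ 5
      · -- cr = 4, hist all radiant of length 4
        have hcr4 : cr = 4 := by omega
        have hhl : hist.length = 4 := by
          have := pvTC_le R hist; omega
        have : hist.all R = true := by
          rw [← pvTC_eq_len_iff]; omega
        rw [if_pos h5, if_pos ⟨by omega, hallR.mpr this⟩]
      · have hnc1 : ¬ (w.length = 5 ∧ w.all R = true) := by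
          rintro ⟨hl5, hall⟩
          have : pvTC R w = w.length := (pvTC_eq_len_iff R w).mpr hall
          omega
        have hnc2 : ¬ (w.length = 5 ∧ w.all D = true) := by
          rintro ⟨_, hall⟩
          have : D v = true := by
            have := List.all_eq_true.mp hall v (by simp [hw])
            exact this
          rw [hDv] at this; exact absurd this (by simp)
        rw [if_neg h5, if_neg hnc1, if_neg hnc2]
        by_cases hl5 : w.length = 5
        · rw [if_pos hl5]
          refine ih (w.drop 1) _ _ (by simp [hl5]) ?_ ?_
          · rw [pvTC_drop1 R w (by omega), hTCRw]
          · rw [pvTC_drop1 D w (by omega), hTCDw]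
        · rw [if_neg hl5]
          exact ih w _ _ (by omega) hTCRw.symm hTCDw.symm
    · have hRv : R v = false := by simp [hR]; omega
      rw [if_neg hvr]
      have hnc1 : ¬ (w.length = 5 ∧ w.all R = true) := by
        rintro ⟨_, hall⟩
        have := List.all_eq_true.mp hall v (by simp [hw])
        rw [hRv] at this; exact absurd this (by simp)
      have hTCRw : pvTC R w = 0 := by rw [hw, pvTC_append, hRv]; simp
      by_cases hvd : v ≤ -3000
      · have hDv : D v = true := by simp [hD, hvd]
        have hallD : w.all D = true ↔ hist.all D = true := by simp [hw, hDv]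
        have hTCDw : pvTC D w = cd + 1 := by rw [hw, pvTC_append, hDv, if_pos rfl, hd]
        rw [if_pos hvd]
        by_cases h5 : cd + 1 ≥ 5
        · have hcd4 : cd = 4 := by omega
          have hhl : hist.length = 4 := by
            have := pvTC_le D hist; omega
          have : hist.all D = true := by
            rw [← pvTC_eq_len_iff]; omega
          rw [if_pos h5, if_neg hnc1, if_pos ⟨by omega, hallD.mpr this⟩]
        · have hnc2 : ¬ (w.length = 5 ∧ w.all D = true) := by
            rintro ⟨hl5, hall⟩
            have : pvTC D w = w.length := (pvTC_eq_len_iff D w).mpr hall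
            omega
          rw [if_neg h5, if_neg hnc1, if_neg hnc2]
          by_cases hl5 : w.length = 5
          · rw [if_pos hl5]
            refine ih (w.drop 1) _ _ (by simp [hl5]) ?_ ?_
            · rw [pvTC_drop1 R w (by omega), hTCRw]
            · rw [pvTC_drop1 D w (by omega), hTCDw]
          · rw [if_neg hl5]
            exact ih w _ _ (by omega) hTCRw.symm hTCDw.symm
      · have hDv : D v = false := by simp [hD]; omega
        have hTCDw : pvTC D w = 0 := by rw [hw, pvTC_append, hDv]; simp
        have hnc2 : ¬ (w.length = 5 ∧ w.all D = true) := by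
          rintro ⟨_, hall⟩
          have := List.all_eq_true.mp hall v (by simp [hw])
          rw [hDv] at this; exact absurd this (by simp)
        rw [if_neg hvd, if_neg hnc1, if_neg hnc2]
        by_cases hl5 : w.length = 5
        · rw [if_pos hl5]
          refine ih (w.drop 1) _ _ (by simp [hl5]) ?_ ?_
          · rw [pvTC_drop1 R w (by omega), hTCRw]
          · rw [pvTC_drop1 D w (by omega), hTCDw]
        · rw [if_neg hl5]
          exact ih w _ _ (by omega) hTCRw.symm hTCDw.symm

-- B's index loop equals pvWin with the matching history and remaining values
lemma pvB_steps (leads : List Int) (hlen : 30 ≤ leads.length) :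
    ∀ k : Nat, k ≤ 11 →
    pvLoopB leads (PySem.List.pyRange ((30 - k : Nat) : Int) 30 1)
      = pvWin ((leads.drop (26 - k)).take 4) ((leads.drop (30 - k)).take k) := by
  intro k
  induction k with
  | zero =>
    intro _
    rw [PySem.List.pyRange_one_eq_nil (by norm_num)]
    simp [pvLoopB, pvWin]
  | succ k ih =>
    intro hk
    have hk' : k ≤ 11 := by omega
    have e1 : 30 - (k + 1) = 29 - k := by omega
    have e2 : 26 - (k + 1) = 25 - k := by omega
    rw [e1, e2, PySem.List.pyRange_one_cons (by omega : ((29 - k : Nat) : Int) < 30)]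
    simp only [pvLoopB]
    have ha : (((29 - k : Nat) : Int) - 4) = ((25 - k : Nat) : Int) := by omega
    have hb : (((29 - k : Nat) : Int) + 1) = ((30 - k : Nat) : Int) := by omega
    rw [ha, hb, PySem.List.slice_natCast]
    have hbs : (30 - k) - (25 - k) = 5 := by omega
    rw [hbs]
    -- the slice equals hist ++ [leads[29-k]]
    have hidx : 29 - k < leads.length := by omega
    have hconcat : (leads.drop (25 - k)).take 5
        = (leads.drop (25 - k)).take 4 ++ [leads[29 - k]] := by
      rw [List.take_succ]
      congr 1
      rw [List.getElem?_drop]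
      have h4 : 25 - k + 4 = 29 - k := by omega
      rw [h4, List.getElem?_eq_getElem hidx]
      rfl
    have hlen5 : ((leads.drop (25 - k)).take 5).length = 5 := by
      simp; omega
    -- decompose the remaining values
    have hvals : (leads.drop (29 - k)).take (k + 1)
        = leads[29 - k] :: (leads.drop (30 - k)).take k := by
      rw [List.drop_eq_getElem_cons hidx, List.take_succ_cons,
          show 29 - k + 1 = 30 - k from by omega]
    rw [hvals]
    simp only [pvWin]
    rw [show (leads.drop (25 - k)).take 4 ++ [leads[29 - k]]
          = (leads.drop (25 - k)).take 5 from hconcat.symm]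
    have hdrop : ((leads.drop (25 - k)).take 5).drop 1 = (leads.drop (26 - k)).take 4 := by
      rw [List.drop_take, List.drop_drop]
      norm_num
      rw [show 25 - k + 1 = 26 - k from by omega]
    simp only [hlen5, eq_self_iff_true, true_and, if_true]
    by_cases c1 : ((leads.drop (25 - k)).take 5).all (fun x => decide (x ≥ 3000)) = true
    · rw [if_pos c1, if_pos c1]
    · rw [if_neg c1, if_neg c1]
      by_cases c2 : ((leads.drop (25 - k)).take 5).all (fun x => decide (x ≤ -3000)) = true
      · rw [if_pos c2, if_pos c2]
      · rw [if_neg c2, if_neg c2, hdrop]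
        exact ih hk'

-- pvWin absorbs a value into a short history without checking
lemma pvWin_grow (hist : List Int) (v : Int) (rest : List Int) (h : hist.length ≤ 3) :
    pvWin hist (v :: rest) = pvWin (hist ++ [v]) rest := by
  simp only [pvWin]
  rw [if_neg (by rintro ⟨h5, _⟩; simp at h5; omega),
      if_neg (by rintro ⟨h5, _⟩; simp at h5; omega),
      if_neg (by simp; omega)]

-- ===== VERDICT =====
theorem is_early_match_stable3k_5min_spec : Claim_equal_is_early_match_stable3k_5min := by
  intro match_ _
  unfold Spec_is_early_match_stable3k_5min
  unfold is_early_match_stable3k_5min is_early_match_stable3k_5min_alt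
  set leads := PySem.Dict.getD (PySem.Dict.mk match_) "radiantNetworthLeads" [] with hleads
  by_cases hg : (leads.length : Int) < 30 ∨ (leads.length : Int) > 50
  · rw [if_pos hg, if_pos (by omega)]
  · have hp : 30 ≤ leads.length ∧ leads.length ≤ 50 := by omega
    rw [if_neg hg, if_neg (not_not_intro hp)]
    have hmin : min 30 ((leads.length : Int)) = 30 := by omega
    rw [hmin]
    -- B side to pvWin
    have hB : pvLoopB leads (PySem.List.pyRange 19 30 1)
        = pvWin ((leads.drop 15).take 4) ((leads.drop 19).take 11) := by
      have := pvB_steps leads (by omega) 11 (by norm_num)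
      norm_num at this
      exact this
    rw [hB]
    -- A side to values
    rw [pvLoopA_eq_vals,
      show (30 : Int) = ((15 : Nat) : Int) + ((15 : Nat) : Int) from by norm_num,
      show (15 : Int) = ((15 : Nat) : Int) from by norm_num,
      pv_map_get_range leads 15 15 (by omega)]
    -- peel the first four values into the history
    have step : ∀ (a j : Nat) (ha : a < leads.length),
        (leads.drop a).take (j + 1) = leads[a]'ha :: (leads.drop (a + 1)).take j := by
      intro a j ha
      rw [List.drop_eq_getElem_cons ha, List.take_succ_cons]
    have h15 : (leads.drop 15).take 15
        = leads[15]'(by omega) :: (leads.drop 16).take 14 := step 15 14 (by omega)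
    have h16 : (leads.drop 16).take 14
        = leads[16]'(by omega) :: (leads.drop 17).take 13 := step 16 13 (by omega)
    have h17 : (leads.drop 17).take 13
        = leads[17]'(by omega) :: (leads.drop 18).take 12 := step 17 12 (by omega)
    have h18 : (leads.drop 18).take 12
        = leads[18]'(by omega) :: (leads.drop 19).take 11 := step 18 11 (by omega)
    have htake : ∀ (a j : Nat) (ha : a + j < leads.length),
        (leads.drop a).take j ++ [leads[a + j]'ha] = (leads.drop a).take (j + 1) := by
      intro a j ha
      rw [List.take_succ]
      congr 1
      rw [List.getElem?_drop, List.getElem?_eq_getElem ha]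
      rfl
    rw [h15, h16, h17, h18,
        pv_core _ [] 0 0 (by simp) rfl rfl,
        pvWin_grow [] (leads[15]'(by omega)) _ (by simp),
        pvWin_grow _ (leads[16]'(by omega)) _ (by simp),
        pvWin_grow _ (leads[17]'(by omega)) _ (by simp)]
    have e1 : ([] : List Int) ++ [leads[15]'(by omega)] = (leads.drop 15).take 1 := by
      have := htake 15 0 (by omega); simpa using this
    have e2 : (leads.drop 15).take 1 ++ [leads[16]'(by omega)] = (leads.drop 15).take 2 :=
      htake 15 1 (by omega)
    have e3 : (leads.drop 15).take 2 ++ [leads[17]'(by omega)] = (leads.drop 15).take 3 :=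
      htake 15 2 (by omega)
    have e4 : (leads.drop 15).take 3 ++ [leads[18]'(by omega)] = (leads.drop 15).take 4 :=
      htake 15 3 (by omega)
    rw [e1, e2, e3]
    rw [pvWin_grow _ (leads[18]'(by omega)) _ (by simp [List.length_take]), e4]
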